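-- pv_equiv track=rewrite | github.com/conanbke-ai/BKE | Algorism/Python/Inflearn/CodingTest/16.격자판 최대합.py | solution
-- ===== SOURCE A (Python) =====
-- def solution(matrix):
--
--     result = []
--     sum = 0
--
--     # 각 행의 합
--     for i in range(len(matrix)):
--         for j in range(len(matrix)):
--             sum += matrix[i][j]
--         result.append(sum)
--         sum = 0
--
--     # 각 열의 합
--     for i in range(len(matrix)):
--         for j in range(len(matrix)):
--             sum += matrix[j][i]
--         result.append(sum)
--         sum = 0
--
--     # 두 대각선의 합
--     for i in range(len(matrix)):
--         sum += matrix[i][i]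
--     result.append(sum)
--     sum = 0
--
--     for i in range(len(matrix)):
--         sum += matrix[len(matrix) - i - 1][i]
--     result.append(sum)
--     sum = 0
--
--     return max(result)
-- ===== SOURCE B (Python) =====
-- def solution(matrix):
--     # One pass over the rows: row sums, column sums (vector accumulation via
--     # zip), and both diagonals are all accumulated while enumerating the rows.
--     n = len(matrix)
--     row_sums = []
--     col_sums = [0] * n
--     diag = 0
--     anti = 0
--     for i, row in enumerate(matrix):
--         head = row[:n]
--         row_sums.append(sum(head))
--         col_sums = [c + v for c, v in zip(col_sums, head)]
--         diag += row[i]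
--         anti += row[n - 1 - i]
--     return max(row_sums + col_sums + [diag, anti])
-- ===== Notes on version B (the rewrite author's own statement) =====
-- stated objective: alternative
-- what changed: A makes four separate index-driven passes (row loop, column loop, two diagonal loops) building a result list; B makes one pass over the rows, accumulating row sums, column sums (elementwise zip addition) and both diagonals simultaneously, then takes the max.
import Mathlib
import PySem

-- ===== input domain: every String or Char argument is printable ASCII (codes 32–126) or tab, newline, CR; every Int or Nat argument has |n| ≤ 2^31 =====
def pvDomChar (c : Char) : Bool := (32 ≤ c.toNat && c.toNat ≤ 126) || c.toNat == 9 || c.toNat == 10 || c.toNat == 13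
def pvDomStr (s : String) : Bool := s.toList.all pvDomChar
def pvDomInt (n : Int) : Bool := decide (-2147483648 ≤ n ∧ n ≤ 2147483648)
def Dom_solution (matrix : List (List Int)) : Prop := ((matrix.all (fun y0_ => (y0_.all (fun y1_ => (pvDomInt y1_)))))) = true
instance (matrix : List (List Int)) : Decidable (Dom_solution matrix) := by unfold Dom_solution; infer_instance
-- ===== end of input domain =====

-- B fuses A's four index-loop passes into one pass over the rows (zip-accumulated
-- column sums); same return value on all square-ish inputs A accepts.

-- ===== PORT A =====
-- matrix[i][j] (IndexError = default, excluded by Pre_)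
def pvGet (matrix : List (List Int)) (i j : Int) : Int :=
  PySem.List.pyGetD (PySem.List.pyGetD matrix i []) j 0

def solution (matrix : List (List Int)) : Int :=
  let n : Int := matrix.length
  -- row sums
  let result := (PySem.List.pyRange 0 n 1).foldl (fun res i =>
      res ++ [(PySem.List.pyRange 0 n 1).foldl (fun s j => s + pvGet matrix i j) 0]) []
  -- column sums
  let result := (PySem.List.pyRange 0 n 1).foldl (fun res i =>
      res ++ [(PySem.List.pyRange 0 n 1).foldl (fun s j => s + pvGet matrix j i) 0]) result
  -- the two diagonals
  let result := result ++ [(PySem.List.pyRange 0 n 1).foldl (fun s i => s + pvGet matrix i i) 0]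
  let result := result ++ [(PySem.List.pyRange 0 n 1).foldl (fun s i => s + pvGet matrix (n - i - 1) i) 0]
  (PySem.List.max? result (fun x => x)).getD 0

-- ===== PORT B =====
def solution_alt (matrix : List (List Int)) : Int :=
  let n := matrix.length
  let st := (PySem.List.enumerate matrix 0).foldl
    (fun (st : List Int × List Int × Int × Int) p =>
      let head := PySem.List.slice p.2 none (some (n : Int))
      (st.1 ++ [head.sum],
       (st.2.1.zip head).map (fun q => q.1 + q.2),
       st.2.2.1 + PySem.List.pyGetD p.2 p.1 0,
       st.2.2.2 + PySem.List.pyGetD p.2 ((n : Int) - 1 - p.1) 0))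
    ([], List.replicate n 0, 0, 0)
  (PySem.List.max? (st.1 ++ st.2.1 ++ [st.2.2.1, st.2.2.2]) (fun x => x)).getD 0

-- ===== PRECONDITION & SPEC =====
-- Pre_ excludes non-square inputs with a row shorter than the matrix (Python A
-- raises IndexError there); rows may be longer, exactly as A accepts.
def Pre_solution (matrix : List (List Int)) : Prop :=
  ∀ row ∈ matrix, matrix.length ≤ row.length
instance (matrix : List (List Int)) : Decidable (Pre_solution matrix) := by
  unfold Pre_solution; infer_instance

def pvWitness_solution : List (List Int) := [[1, 2], [3, 4]]

def Spec_solution (matrix : List (List Int)) (out : Int) : Prop := out = solution_alt matrix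
instance (matrix : List (List Int)) (out : Int) : Decidable (Spec_solution matrix out) := by unfold Spec_solution; infer_instance

-- ===== CLAIM (what is proved, stated in full; the proofs are below) =====
def Claim_equal_solution : Prop := ∀ (matrix : List (List Int)), Dom_solution matrix → Pre_solution matrix → Spec_solution matrix (solution matrix)

-- ===== LEMMAS AND PROOFS =====

-- pyRange 0 n 1 over a Nat bound, as a mapped List.range
theorem pyRange_zero_cast (n : Nat) :
    PySem.List.pyRange 0 (n : Int) 1 = (List.range n).map (fun k => (k : Int)) := by
  rw [PySem.List.pyRange_one]
  simp
  exact List.map_eq_flatMap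

-- summing f(n-1-i) over range n is summing f over range n
theorem sum_range_reflect_int (n : Nat) (f : Nat → Int) :
    ((List.range n).map (fun i => f (n - 1 - i))).sum = ((List.range n).map f).sum :=
  calc ((List.range n).map (fun i => f (n - 1 - i))).sum
      = ∑ i ∈ Finset.range n, f (n - 1 - i) := rfl
    _ = ∑ i ∈ Finset.range n, f i := Finset.sum_range_reflect f n
    _ = ((List.range n).map f).sum := rfl

-- range-indexed reads of a prefix are the prefix itself
theorem map_range_getD {α : Type} (xs : List α) (d : α) (n : Nat) (h : n ≤ xs.length) :
    (List.range n).map (fun j => xs.getD j d) = xs.take n := by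
  apply List.ext_getElem
  · simp [h]
  · intro i h1 h2
    simp at h1 h2 ⊢
    simp [List.getElem?_eq_getElem (show i < xs.length by omega)]

-- one zip-add step on a range-shaped accumulator
theorem zip_add_step (n : Nat) (g : Nat → Int) (head : List Int) (hh : head.length = n) :
    ((((List.range n).map g).zip head).map (fun q => q.1 + q.2)) =
      (List.range n).map (fun j => g j + head.getD j 0) := by
  apply List.ext_getElem
  · simp [hh]
  · intro i h1 h2
    simp at h1 h2 ⊢
    simp [List.getElem?_eq_getElem (show i < head.length by omega)]

-- the column accumulator stays range-shaped through the fold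
theorem col_fold (rows : List (List Int)) (n : Nat) (hn : ∀ r ∈ rows, n ≤ r.length)
    (g : Nat → Int) :
    rows.foldl (fun cs row =>
        ((cs.zip (PySem.List.slice row none (some (n : Int)))).map (fun q => q.1 + q.2)))
      ((List.range n).map g)
    = (List.range n).map (fun j => g j + (rows.map (fun r => r.getD j 0)).sum) := by
  induction rows generalizing g with
  | nil => simp
  | cons r rs ih =>
    have hr : n ≤ r.length := hn r (by simp)
    have hslice : PySem.List.slice r none (some (n : Int)) = r.take n :=
      PySem.List.slice_to_natCast r n
    rw [List.foldl_cons, hslice,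
        zip_add_step n g (r.take n) (by simp [hr]),
        ih (fun x hx => hn x (by simp [hx]))]
    apply List.map_congr_left
    intro j hj
    simp at hj
    have : (r.take n).getD j 0 = r.getD j 0 := by
      rw [List.getD_eq_getElem (r.take n) 0 (by simp; omega),
          List.getD_eq_getElem r 0 (by omega)]
      simp [List.getElem_take]
    rw [this]
    simp [List.map_cons, add_assoc]

-- B's fold, in closed form
theorem b_fold (rows : List (List Int)) (n : Nat) (hn : ∀ r ∈ rows, n ≤ r.length) (s : Int)
    (rs0 : List Int) (g : Nat → Int) (d0 a0 : Int) :
    (PySem.List.enumerate rows s).foldl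
      (fun (st : List Int × List Int × Int × Int) p =>
        let head := PySem.List.slice p.2 none (some (n : Int))
        (st.1 ++ [head.sum],
         (st.2.1.zip head).map (fun q => q.1 + q.2),
         st.2.2.1 + PySem.List.pyGetD p.2 p.1 0,
         st.2.2.2 + PySem.List.pyGetD p.2 ((n : Int) - 1 - p.1) 0))
      (rs0, (List.range n).map g, d0, a0)
    = (rs0 ++ rows.map (fun r => (PySem.List.slice r none (some (n : Int))).sum),
       rows.foldl (fun cs row =>
         ((cs.zip (PySem.List.slice row none (some (n : Int)))).map (fun q => q.1 + q.2)))
         ((List.range n).map g),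
       d0 + ((List.range rows.length).map
         (fun i => PySem.List.pyGetD (rows.getD i []) (s + i) 0)).sum,
       a0 + ((List.range rows.length).map
         (fun i => PySem.List.pyGetD (rows.getD i []) ((n : Int) - 1 - (s + i)) 0)).sum) := by
  induction rows generalizing s rs0 g d0 a0 with
  | nil => simp [PySem.List.enumerate_nil]
  | cons r rs ih =>
    have hr : n ≤ r.length := hn r (by simp)
    have hslice : PySem.List.slice r none (some (n : Int)) = r.take n :=
      PySem.List.slice_to_natCast r n
    rw [PySem.List.enumerate_cons, List.foldl_cons, List.foldl_cons]
    simp only [hslice]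
    rw [zip_add_step n g (r.take n) (by simp [hr])]
    rw [ih (fun x hx => hn x (by simp [hx])) (s + 1) (rs0 ++ [(r.take n).sum])
        (fun j => g j + (r.take n).getD j 0) (d0 + PySem.List.pyGetD r s 0)
        (a0 + PySem.List.pyGetD r ((n : Int) - 1 - s) 0)]
    refine Prod.ext ?_ (Prod.ext ?_ (Prod.ext ?_ ?_))
    · simp
    · rfl
    · simp only [List.length_cons, List.range_succ_eq_map, List.map_cons, List.map_map,
        List.sum_cons, List.getD_cons_zero, List.getD_cons_succ, Function.comp_def,
        Nat.cast_zero, add_zero]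
      rw [add_assoc]
      congr 2
      refine congrArg List.sum (List.map_congr_left ?_)
      intro i hi
      congr 1
      push_cast; ring
    · simp only [List.length_cons, List.range_succ_eq_map, List.map_cons, List.map_map,
        List.sum_cons, List.getD_cons_zero, List.getD_cons_succ, Function.comp_def,
        Nat.cast_zero, add_zero]
      rw [add_assoc]
      congr 2
      refine congrArg List.sum (List.map_congr_left ?_)
      intro i hi
      congr 1
      push_cast; ring

-- ===== VERDICT (by name: the statement is the Claim_ definition above) =====
theorem solution_spec : Claim_equal_solution := by
  intro matrix _ hpre
  unfold Spec_solution solution solution_alt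
  dsimp only
  rw [show (List.replicate matrix.length (0:Int)) = (List.range matrix.length).map (fun _ => (0:Int)) from by simp]
  rw [b_fold matrix matrix.length hpre 0 [] (fun _ => 0) 0 0]
  rw [col_fold matrix matrix.length hpre (fun _ => 0)]
  simp only [PySem.List.foldl_append_singleton_eq_map, PySem.List.foldl_add,
    pyRange_zero_cast, List.bind_eq_flatMap, List.pure_def, ← List.map_eq_flatMap,
    List.map_map, Function.comp_def, pvGet,
    PySem.List.pyGetD_natCast, PySem.List.slice_to_natCast, List.nil_append,
    zero_add, List.append_assoc]
  congr 1
  have hmaplen : (List.range matrix.length).map (fun i => matrix.getD i []) = matrix := by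
    rw [map_range_getD matrix [] matrix.length le_rfl, List.take_length]
  have hrowmap : ∀ (F : List Int → Int),
      (List.range matrix.length).map (fun i => F (matrix.getD i [])) = matrix.map F := by
    intro F
    conv_rhs => rw [← hmaplen]
    rw [List.map_map]
    rfl
  have hmem : ∀ i, i < matrix.length → matrix.getD i [] ∈ matrix := by
    intro i hi
    rw [List.getD_eq_getElem matrix [] hi]
    exact List.getElem_mem hi
  rw [← hrowmap (fun r => (List.take matrix.length r).sum)]
  have h1 : List.map (fun x => (List.map (fun x_1 => (matrix.getD x []).getD x_1 0)
        (List.range matrix.length)).sum) (List.range matrix.length)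
      = List.map (fun i => (List.take matrix.length (matrix.getD i [])).sum)
        (List.range matrix.length) := by
    apply List.map_congr_left
    intro i hi
    simp only [List.mem_range] at hi
    rw [map_range_getD (matrix.getD i []) 0 matrix.length (hpre _ (hmem i hi))]
  have h2 : List.map (fun x => (List.map (fun x_1 => (matrix.getD x_1 []).getD x 0)
        (List.range matrix.length)).sum) (List.range matrix.length)
      = List.map (fun j => (List.map (fun r => r.getD j 0) matrix).sum)
        (List.range matrix.length) := by
    apply List.map_congr_left
    intro j hj
    rw [← hrowmap (fun r => r.getD j 0)]
  have h4 : (List.map (fun (x : Nat) => (PySem.List.pyGetD matrix ((matrix.length : Int) - (x : Int) - 1) []).getD x 0)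
        (List.range matrix.length)).sum
      = (List.map (fun i => PySem.List.pyGetD (matrix.getD i []) ((matrix.length : Int) - 1 - (i : Int)) 0)
        (List.range matrix.length)).sum := by
    rw [List.map_congr_left
      (f := fun (x : Nat) => (PySem.List.pyGetD matrix ((matrix.length : Int) - (x : Int) - 1) []).getD x 0)
      (g := fun x =>
        (matrix.getD (matrix.length - 1 - x) []).getD (matrix.length - 1 - (matrix.length - 1 - x)) 0)
      (by
        intro x hx
        simp only [List.mem_range] at hx
        dsimp only
        rw [show ((matrix.length : Int) - (x : Int) - 1) = (((matrix.length - 1 - x : Nat)) : Int) from by omega,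
            PySem.List.pyGetD_natCast]
        congr 2
        omega)]
    rw [sum_range_reflect_int matrix.length (fun i => (matrix.getD i []).getD (matrix.length - 1 - i) 0)]
    apply congrArg List.sum
    apply List.map_congr_left
    intro i hi
    simp only [List.mem_range] at hi
    rw [show ((matrix.length : Int) - 1 - (i : Int)) = (((matrix.length - 1 - i : Nat)) : Int) from by omega,
        PySem.List.pyGetD_natCast]
  rw [h1, h2, h4]
  rfl
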